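-- pv_equiv track=rewrite | github.com/Azayel/RSA | sauber_rsa.py | find_e
-- ===== SOURCE A (Python) =====
-- def factors(number):
--     factors = []
--
--     for i in range(2, number):
--
--         if ((number % i) == 0):
--
--             factors.append(i)
--
--     return factors
--
-- def if_coprime(to_chek, n_or_t):
--     to_check_factors = factors(to_chek)
--     n_or_t_factors = factors(n_or_t)
--     if set(to_check_factors).isdisjoint(set(n_or_t_factors)):
--         # No common Factors -> Coprime
--         return True
--     else:
--         # Not Coprime
--         return False
--
-- def find_e(t, n):
--     candidates = []
--     f_t = factors(t)
--     f_n = factors(n)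
--     for i in range(2, t):
--         #if_coprime(i, n) and
--         if if_coprime(i, t) and t % i != 0 and n % i != 0:
--             candidates.append(i)
--
--     return candidates[0]
-- ===== SOURCE B (Python) =====
-- def _gcd(a, b):
--     while b != 0:
--         a, b = b, a % b
--     return a
--
-- def find_e(t, n):
--     for i in range(2, t):
--         if _gcd(i, t) == 1 and n % i != 0:
--             return i
--     raise IndexError("no exponent coprime to t found")
-- ===== Notes on version B (the rewrite author's own statement) =====
-- stated objective: faster
-- what changed: B replaces A's per-candidate construction of full factor lists of i and t (factors(t) rebuilt on every iteration) and the final candidates-list indexing by a Euclidean-gcd coprimality test with an early return of the first valid i.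
import Mathlib
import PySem

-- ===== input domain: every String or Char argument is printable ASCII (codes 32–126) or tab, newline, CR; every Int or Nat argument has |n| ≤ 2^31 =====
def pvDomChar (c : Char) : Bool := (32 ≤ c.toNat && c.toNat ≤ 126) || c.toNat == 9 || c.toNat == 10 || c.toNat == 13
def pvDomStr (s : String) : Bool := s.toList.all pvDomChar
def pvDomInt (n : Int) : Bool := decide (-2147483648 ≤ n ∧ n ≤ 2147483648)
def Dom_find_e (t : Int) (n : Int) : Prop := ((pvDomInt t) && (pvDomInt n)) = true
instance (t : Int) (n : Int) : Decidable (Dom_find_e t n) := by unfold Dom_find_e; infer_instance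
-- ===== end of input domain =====

-- B replaces A's per-candidate factor-list construction by a Euclid-gcd test with early return; equal return values on Pre_ (where A does not raise IndexError).

-- ===== PORT A =====
def pvFactors (number : Int) : List Int :=
  (PySem.List.pyRange 2 number 1).foldl
    (fun acc i => if PySem.Int.mod number i == 0 then acc ++ [i] else acc) []

def pvIfCoprime (to_chek : Int) (n_or_t : Int) : Bool :=
  let to_check_factors := pvFactors to_chek
  let n_or_t_factors := pvFactors n_or_t
  if PySem.Set.isdisjoint (PySem.Set.ofList to_check_factors) (PySem.Set.ofList n_or_t_factors)
  then true else false

def find_e (t : Int) (n : Int) : Int :=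
  let _f_t := pvFactors t
  let _f_n := pvFactors n
  let candidates :=
    (PySem.List.pyRange 2 t 1).foldl
      (fun acc i =>
        if pvIfCoprime i t && PySem.Int.mod t i != 0 && PySem.Int.mod n i != 0
        then acc ++ [i] else acc) []
  (PySem.List.pyGet? candidates 0).getD 0   -- candidates[0]; none (IndexError) excluded by Pre_

-- ===== PORT B =====
-- termination fact for the Euclid loop, cited by pvGcd's decreasing_by
theorem pvMod_natAbs_lt (a b : Int) (h : b ≠ 0) : (PySem.Int.mod a b).natAbs < b.natAbs := by
  rcases lt_or_gt_of_ne h with hb | hb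
  · have := PySem.Int.mod_neg_bounds a hb; omega
  · have h1 := PySem.Int.mod_nonneg a hb; have h2 := PySem.Int.mod_lt a hb; omega

def pvGcd (a : Int) (b : Int) : Int :=
  if hb : b = 0 then a else pvGcd b (PySem.Int.mod a b)
termination_by b.natAbs
decreasing_by exact pvMod_natAbs_lt a b hb

def find_e_alt (t : Int) (n : Int) : Int :=
  ((PySem.List.pyRange 2 t 1).find?
    (fun i => pvGcd i t == 1 && PySem.Int.mod n i != 0)).getD 0   -- raise: excluded by Pre_

-- ===== PRECONDITION & SPEC =====
-- Pre_ excludes exactly the inputs on which Python A raises IndexError (candidates is empty: no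
-- i in range(2, t) is coprime to t with n % i != 0, e.g. whenever t <= 2 or n = 0); B raises
-- IndexError there too.  The t > 71 branch is the same condition written in closed form: on
-- Dom_ (|t|, |n| ≤ 2^31) t and n each have at most 9 distinct prime factors while there are
-- 19 primes ≤ 67 < t, so for n ≠ 0 some prime p ≤ 67 satisfies gcd(p, t) = 1 and n % p != 0,
-- and for n = 0 every i divides n, so no candidate exists for any t.
def Pre_find_e (t : Int) (n : Int) : Prop :=
  if t ≤ 71 then ∃ i ∈ PySem.List.pyRange 2 t 1, Int.gcd i t = 1 ∧ PySem.Int.mod n i ≠ 0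
  else n ≠ 0
instance (t : Int) (n : Int) : Decidable (Pre_find_e t n) := by unfold Pre_find_e; infer_instance
def pvWitness_find_e : Int × Int := (5, 7)

def Spec_find_e (t : Int) (n : Int) (out : Int) : Prop := out = find_e_alt t n
instance (t : Int) (n : Int) (out : Int) : Decidable (Spec_find_e t n out) := by unfold Spec_find_e; infer_instance

-- ===== CLAIM (what is proved, stated in full; the proofs are below) =====
def Claim_equal_find_e : Prop := ∀ (t : Int) (n : Int), Dom_find_e t n → Pre_find_e t n → Spec_find_e t n (find_e t n)

-- ===== LEMMAS AND PROOFS =====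

theorem pvFactors_eq_filter (m : Int) :
    pvFactors m = (PySem.List.pyRange 2 m 1).filter (fun i => PySem.Int.mod m i == 0) := by
  unfold pvFactors
  exact PySem.List.foldl_append_if_eq_filter (fun i => PySem.Int.mod m i == 0) _ []

theorem mem_pvFactors (m x : Int) : x ∈ pvFactors m ↔ (2 ≤ x ∧ x < m) ∧ x ∣ m := by
  rw [pvFactors_eq_filter]
  simp [List.mem_filter, PySem.List.mem_pyRange_one, PySem.Int.mod_eq_zero_iff_dvd, and_comm]

theorem pvGcd_eq_gcd : ∀ (k : Nat) (a b : Int), b.natAbs = k → 0 ≤ a → 0 ≤ b →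
    pvGcd a b = Int.gcd a b := by
  intro k
  induction k using Nat.strong_induction_on with
  | _ k ih =>
    intro a b hk ha hb
    rw [pvGcd]
    split_ifs with h
    · subst h
      simp [Int.gcd, Int.natAbs_of_nonneg ha]
    · have hbpos : 0 < b := lt_of_le_of_ne hb (Ne.symm h)
      have hmn := PySem.Int.mod_nonneg a hbpos
      have hml := PySem.Int.mod_lt a hbpos
      rw [ih (PySem.Int.mod a b).natAbs (by omega) b (PySem.Int.mod a b) rfl hb hmn]
      rw [PySem.Int.mod_eq_emod_of_pos hbpos, Int.gcd_comm b, Int.gcd_emod]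

-- core: A's "factor lists disjoint and t % i != 0" is exactly gcd(i,t) = 1, for 2 ≤ i < t
theorem coprime_char (i t : Int) (h2 : 2 ≤ i) (hlt : i < t) :
    ((∀ x ∈ pvFactors i, x ∉ pvFactors t) ∧ ¬ i ∣ t) ↔ Int.gcd i t = 1 := by
  constructor
  · rintro ⟨hdisj, hndvd⟩
    by_contra hg
    have hgne : Int.gcd i t ≠ 0 := by
      simp [Int.gcd_eq_zero_iff]; intro h; omega
    set g := Int.gcd i t with hgdef
    have hp : (g.minFac) ∣ g := Nat.minFac_dvd g
    have hprime : Nat.Prime g.minFac := Nat.minFac_prime (by omega)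
    set p := g.minFac with hpdef
    have hpi : (p : Int) ∣ i := dvd_trans (Int.natCast_dvd_natCast.mpr hp) (Int.gcd_dvd_left i t)
    have hpt : (p : Int) ∣ t := dvd_trans (Int.natCast_dvd_natCast.mpr hp) (Int.gcd_dvd_right i t)
    have hp2 : 2 ≤ (p : Int) := by exact_mod_cast hprime.two_le
    have hple : (p : Int) ≤ i := Int.le_of_dvd (by omega) hpi
    rcases eq_or_lt_of_le hple with heq | hplt
    · exact hndvd (heq ▸ hpt)
    · exact hdisj (p : Int) ((mem_pvFactors i _).mpr ⟨⟨hp2, hplt⟩, hpi⟩)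
        ((mem_pvFactors t _).mpr ⟨⟨hp2, by omega⟩, hpt⟩)
  · intro hg
    constructor
    · intro x hxi hxt
      rw [mem_pvFactors] at hxi hxt
      have hdg : x ∣ (Int.gcd i t : Int) := Int.dvd_coe_gcd hxi.2 hxt.2
      rw [hg] at hdg; norm_num at hdg
      have := Int.le_of_dvd (by norm_num) hdg
      omega
    · intro hdvd
      have hdg : i ∣ (Int.gcd i t : Int) := Int.dvd_coe_gcd dvd_rfl hdvd
      rw [hg] at hdg; norm_num at hdg
      have := Int.le_of_dvd (by norm_num) hdg
      omega

-- predicates of the two loops agree on every i of range(2, t)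
theorem pred_eq (t n i : Int) (hi : i ∈ PySem.List.pyRange 2 t 1) :
    (pvIfCoprime i t && PySem.Int.mod t i != 0 && PySem.Int.mod n i != 0)
      = (pvGcd i t == 1 && PySem.Int.mod n i != 0) := by
  rw [PySem.List.mem_pyRange_one] at hi
  have hgcd : pvGcd i t = (Int.gcd i t : Int) :=
    pvGcd_eq_gcd t.natAbs i t rfl (by omega) (by omega)
  rw [Bool.eq_iff_iff]
  simp only [Bool.and_eq_true, bne_iff_ne, ne_eq, beq_iff_eq, pvIfCoprime,
    Bool.if_false_right, Bool.and_true, decide_eq_true_eq, PySem.Set.isdisjoint_iff, hgcd]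
  constructor
  · rintro ⟨⟨hdisj, hti⟩, hni⟩
    refine ⟨?_, hni⟩
    have hg : Int.gcd i t = 1 := (coprime_char i t hi.1 hi.2).mp
      ⟨fun x hx hx' => hdisj x ((PySem.Set.mem_ofList _ _).mpr hx) ((PySem.Set.mem_ofList _ _).mpr hx'),
       fun hd => hti ((PySem.Int.mod_eq_zero_iff_dvd t i).mpr hd)⟩
    exact_mod_cast hg
  · rintro ⟨hg, hni⟩
    have hg' : Int.gcd i t = 1 := by exact_mod_cast hg
    obtain ⟨hdisj, hndvd⟩ := (coprime_char i t hi.1 hi.2).mpr hg'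
    refine ⟨⟨fun x hx hx' =>
      hdisj x ((PySem.Set.mem_ofList _ _).mp hx) ((PySem.Set.mem_ofList _ _).mp hx'), ?_⟩, hni⟩
    intro h0; exact hndvd ((PySem.Int.mod_eq_zero_iff_dvd t i).mp h0)

theorem pyGet?_zero_head (xs : List Int) : PySem.List.pyGet? xs 0 = xs.head? := by
  cases xs <;> simp [PySem.List.pyGet?, PySem.List.pyIdx?]

-- ===== VERDICT (by name: the statement is the Claim_ definition above) =====
theorem find_e_spec : Claim_equal_find_e := by
  intro t n _ _
  unfold Spec_find_e find_e find_e_alt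
  rw [PySem.List.foldl_append_if_eq_filter, List.nil_append]
  rw [List.filter_congr (fun i hi => pred_eq t n i hi)]
  rw [← List.head?_filter]
  simp only [pyGet?_zero_head]
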